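-- pv_equiv track=rewrite | github.com/Oluwafemi-Israel/hackerrank-problems | src/devcenter/pow.py | reduce_exponent
-- ===== SOURCE A (Python) =====
-- def binary(num):
--     result = ""
--     quotient = num
--     while quotient != 0:
--         remainder = quotient % 2
--         quotient = quotient // 2
--         result = "{0}{1}".format(remainder, result)
--
--     return result
--
-- def reduce_exponent(exponent):
--     exponent_in_binary = binary(exponent)
--     num_of_digits = len(exponent_in_binary)
--
--     reduced_exponent = []
--
--     for i in range(num_of_digits):
--         if exponent_in_binary[num_of_digits - i - 1] == "1":
--             reduced_exponent.append(2 ** i)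
--
--     return reduced_exponent
-- ===== SOURCE B (Python) =====
-- def reduce_exponent(exponent):
--     result = []
--     n = exponent
--     while n:
--         low = n & -n          # lowest set bit, as a power of two
--         result.append(low)
--         n -= low
--     return result
-- ===== Notes on version B (the rewrite author's own statement) =====
-- stated objective: simpler
-- what changed: Replaces the build-a-binary-string-then-scan-it-by-index approach with direct lowest-set-bit extraction (n & -n) in a single while loop, with no string machinery at all.
import Mathlib
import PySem

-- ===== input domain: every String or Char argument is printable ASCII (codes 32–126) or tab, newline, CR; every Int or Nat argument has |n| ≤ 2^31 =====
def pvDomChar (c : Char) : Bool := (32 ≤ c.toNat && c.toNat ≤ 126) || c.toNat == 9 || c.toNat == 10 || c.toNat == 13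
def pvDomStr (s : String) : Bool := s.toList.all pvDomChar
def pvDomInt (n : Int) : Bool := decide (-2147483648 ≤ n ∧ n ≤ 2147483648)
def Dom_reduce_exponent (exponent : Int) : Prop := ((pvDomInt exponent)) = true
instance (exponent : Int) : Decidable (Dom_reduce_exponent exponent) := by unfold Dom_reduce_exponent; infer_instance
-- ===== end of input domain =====

-- B replaces A's binary-string construction and index scan by direct lowest-set-bit
-- extraction (n & -n) in one loop; proved to return the same list for all exponent ≥ 0.


-- ===== PORT A =====
-- `while quotient != 0` of `binary`; Python loops forever for negative quotient
-- (excluded by Pre_), so the ≤ 0 test is only a totality guard.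
def pvBinaryLoop (quotient : Int) (result : String) : String :=
  if h : quotient ≤ 0 then result
  else pvBinaryLoop (PySem.Int.floordiv quotient 2)
         (PySem.Int.toStr (PySem.Int.mod quotient 2) ++ result)
termination_by quotient.toNat
decreasing_by
  have := PySem.Int.floordiv_eq_ediv_of_pos (a := quotient) (b := 2) (by omega)
  omega

def pvBinary (num : Int) : String := pvBinaryLoop num ""

def reduce_exponent (exponent : Int) : List Int :=
  let exponent_in_binary := pvBinary exponent
  let num_of_digits : Int := PySem.Str.len exponent_in_binary
  (PySem.List.pyRange 0 num_of_digits 1).foldl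
    (fun acc i =>
      if PySem.Str.pyGet? exponent_in_binary (num_of_digits - i - 1) = some '1'
      then acc ++ [2 ^ i.toNat] else acc) []

-- ===== PORT B =====
-- `while n:` of Source B, run with fuel exponent.toNat + 1 (enough for every n ≥ 0,
-- since each step removes one set bit; Python loops forever for negative n, excluded by Pre_).
def pvAltLoop : Nat → Int → List Int → List Int
  | 0, _, acc => acc
  | fuel + 1, n, acc =>
      if n = 0 then acc
      else
        let low := PySem.Int.band n (-n)
        pvAltLoop fuel (n - low) (acc ++ [low])

def reduce_exponent_alt (exponent : Int) : List Int :=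
  pvAltLoop (exponent.toNat + 1) exponent []

-- ===== PRECONDITION & SPEC =====
-- A's binary() loops forever on negative input (quotient // 2 never reaches 0), so
-- Pre_ admits exactly the nonnegative exponents, on which A returns.
def Pre_reduce_exponent (exponent : Int) : Prop := 0 ≤ exponent
instance (exponent : Int) : Decidable (Pre_reduce_exponent exponent) := by
  unfold Pre_reduce_exponent; infer_instance

def pvWitness_reduce_exponent : Int := (13)

def Spec_reduce_exponent (exponent : Int) (out : List Int) : Prop := out = reduce_exponent_alt exponent
instance (exponent : Int) (out : List Int) : Decidable (Spec_reduce_exponent exponent out) := by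
  unfold Spec_reduce_exponent; infer_instance

-- ===== CLAIM (what is proved, stated in full; the proofs are below) =====
def Claim_equal_reduce_exponent : Prop := ∀ (exponent : Int), Dom_reduce_exponent exponent → Pre_reduce_exponent exponent → Spec_reduce_exponent exponent (reduce_exponent exponent)

-- ===== LEMMAS AND PROOFS =====

-- reversed binary digit characters of a natural number
def pvRbits (m : Nat) : List Char :=
  if m = 0 then [] else (if m % 2 = 1 then '1' else '0') :: pvRbits (m / 2)
termination_by m
decreasing_by exact Nat.div_lt_self (by omega) (by omega)

-- the common value of both programs: powers 2^(i+j) for the set bits j of m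
def pvK (m i : Nat) : List Int :=
  if m = 0 then []
  else (if m % 2 = 1 then [(2 : Int) ^ i] else []) ++ pvK (m / 2) (i + 1)
termination_by m
decreasing_by exact Nat.div_lt_self (by omega) (by omega)

-- A's scan loop, re-expressed as structural recursion over the reversed digit list
def pvScanPow (cs : List Char) (i : Nat) (acc : List Int) : List Int :=
  match cs with
  | [] => acc
  | c :: t => pvScanPow t (i + 1) (if c = '1' then acc ++ [(2 : Int) ^ i] else acc)

-- m with its lowest set bit cleared is m &&& (m-1); the bit itself:
def pvLowN (m : Nat) : Nat := m - (m &&& (m - 1))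

theorem pvBinaryLoop_toList (m : Nat) : ∀ res : String,
    (pvBinaryLoop (m : Int) res).toList = (pvRbits m).reverse ++ res.toList := by
  induction m using Nat.strong_induction_on with
  | _ m IH =>
    intro res
    by_cases h0 : m = 0
    · subst h0
      rw [pvBinaryLoop, dif_pos (by omega), pvRbits, if_pos rfl]
      simp
    · have hdiv : PySem.Int.floordiv (m : Int) 2 = ((m / 2 : Nat) : Int) := by
        exact_mod_cast PySem.Int.floordiv_natCast m 2
      have hmod : PySem.Int.mod (m : Int) 2 = ((m % 2 : Nat) : Int) := by
        exact_mod_cast PySem.Int.mod_natCast m 2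
      rw [pvBinaryLoop, dif_neg (by omega), hdiv, hmod]
      conv_rhs => rw [pvRbits, if_neg h0]
      rw [IH (m / 2) (Nat.div_lt_self (by omega) (by omega)), String.toList_append,
        PySem.Int.toList_toStr]
      have hch : PySem.Int.toChars ((m % 2 : Nat) : Int)
          = [if m % 2 = 1 then '1' else '0'] := by
        rcases Nat.mod_two_eq_zero_or_one m with h | h <;> rw [h] <;> decide
      rw [hch]
      simp

theorem pvFoldl_scan (S : String) (R : List Char) (hS : S.toList = R.reverse) :
    ∀ (j : Nat) (acc : List Int),
    (PySem.List.pyRange (j : Int) (R.length : Int) 1).foldl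
      (fun acc i =>
        if PySem.Str.pyGet? S ((R.length : Int) - i - 1) = some '1'
        then acc ++ [2 ^ i.toNat] else acc) acc
    = pvScanPow (R.drop j) j acc := by
  suffices h : ∀ (k j : Nat), R.length - j = k → ∀ acc,
      (PySem.List.pyRange (j : Int) (R.length : Int) 1).foldl
        (fun acc i =>
          if PySem.Str.pyGet? S ((R.length : Int) - i - 1) = some '1'
          then acc ++ [2 ^ i.toNat] else acc) acc
      = pvScanPow (R.drop j) j acc by
    intro j acc; exact h (R.length - j) j rfl acc
  intro k
  induction k with
  | zero =>
    intro j hj acc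
    rw [List.drop_eq_nil_of_le (by omega), pvScanPow, PySem.List.pyRange_one,
      show ((R.length : Int) - (j : Int)).toNat = 0 by omega]
    simp
  | succ k IHk =>
    intro j hj acc
    have hjlt : j < R.length := by omega
    rw [PySem.List.pyRange_one_cons (by omega), List.foldl_cons,
      List.drop_eq_getElem_cons hjlt, pvScanPow]
    have hidx : ((R.length : Int) - (j : Int) - 1) = ((R.length - 1 - j : Nat) : Int) := by
      omega
    have hget : PySem.Str.pyGet? S ((R.length : Int) - (j : Int) - 1) = some R[j] := by
      rw [hidx, PySem.Str.pyGet?_natCast, hS]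
      have hlt : R.length - 1 - j < R.reverse.length := by simp; omega
      rw [List.getElem?_eq_getElem hlt, List.getElem_reverse]
      congr 2
      omega
    rw [hget, show ((j : Int) + 1) = ((j + 1 : Nat) : Int) by omega,
      IHk (j + 1) (by omega)]
    congr 1
    simp only [Option.some.injEq, Int.toNat_natCast]

theorem pvScanPow_K (m : Nat) : ∀ (i : Nat) (acc : List Int),
    pvScanPow (pvRbits m) i acc = acc ++ pvK m i := by
  induction m using Nat.strong_induction_on with
  | _ m IH =>
    intro i acc
    by_cases h0 : m = 0
    · subst h0; rw [pvRbits, if_pos rfl, pvScanPow, pvK, if_pos rfl]; simp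
    · conv_rhs => rw [pvK, if_neg h0]
      rw [pvRbits, if_neg h0, pvScanPow,
        IH (m / 2) (Nat.div_lt_self (by omega) (by omega))]
      rcases Nat.mod_two_eq_zero_or_one m with h | h <;> rw [h] <;> simp

theorem pvA_eq_K (m : Nat) : reduce_exponent (m : Int) = pvK m 0 := by
  have hS : (pvBinary (m : Int)).toList = (pvRbits m).reverse := by
    rw [pvBinary, pvBinaryLoop_toList]
    simp
  have hlen : PySem.Str.len (pvBinary (m : Int)) = ((pvRbits m).length : Int) := by
    rw [PySem.Str.len_eq, hS]; simp
  rw [reduce_exponent]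
  simp only [hlen]
  rw [show (0 : Int) = ((0 : Nat) : Int) by rfl,
    pvFoldl_scan (pvBinary (m : Int)) (pvRbits m) hS 0, List.drop_zero, pvScanPow_K,
    List.nil_append]

-- bit facts for the lowest set bit
theorem pv_and_pred_odd (m : Nat) (h : m % 2 = 1) : m &&& (m - 1) = m - 1 := by
  apply Nat.eq_of_testBit_eq
  intro i
  cases i with
  | zero => simp [Nat.testBit_zero, h]
  | succ i =>
      rw [Nat.testBit_and, Nat.testBit_add_one, Nat.testBit_add_one,
        show (m - 1) / 2 = m / 2 by omega, Bool.and_self]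

theorem pv_and_pred_even (k : Nat) (h : 0 < k) :
    (2 * k) &&& (2 * k - 1) = 2 * (k &&& (k - 1)) := by
  apply Nat.eq_of_testBit_eq
  intro i
  cases i with
  | zero => simp [Nat.testBit_zero]
  | succ i =>
      rw [Nat.testBit_and, Nat.testBit_add_one, Nat.testBit_add_one, Nat.testBit_add_one,
        show 2 * k / 2 = k by omega, show (2 * k - 1) / 2 = k - 1 by omega,
        show 2 * (k &&& (k - 1)) / 2 = k &&& (k - 1) by omega, Nat.testBit_and]

theorem pvLowN_pos (m : Nat) (h : 0 < m) : 0 < pvLowN m := by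
  have : m &&& (m - 1) ≤ m - 1 := Nat.and_le_right
  unfold pvLowN; omega

theorem pvK_even (k i : Nat) : pvK (2 * k) i = pvK k (i + 1) := by
  by_cases hk : k = 0
  · subst hk; rw [pvK, pvK]; simp
  · rw [pvK, if_neg (show ¬(2 * k = 0) by omega), if_neg (show ¬(2 * k % 2 = 1) by omega),
      show 2 * k / 2 = k by omega, List.nil_append]

theorem pvK_cons (m : Nat) (h : 0 < m) : ∀ i,
    pvK m i = (2 : Int) ^ i * (pvLowN m : Int) :: pvK (m - pvLowN m) i := by
  induction m using Nat.strong_induction_on with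
  | _ m IH =>
    intro i
    rcases Nat.even_or_odd m with he | ho
    · -- even, m = 2 * (m / 2) with m / 2 > 0
      obtain ⟨k, hk⟩ := he
      have hk2 : m = 2 * k := by omega
      have hkpos : 0 < k := by omega
      have hlow : pvLowN m = 2 * pvLowN k := by
        have h1 : k &&& (k - 1) ≤ k - 1 := Nat.and_le_right
        unfold pvLowN
        rw [hk2, pv_and_pred_even k hkpos]
        omega
      rw [hk2] at hlow ⊢
      rw [pvK_even, IH k (by omega) hkpos (i + 1), hlow]
      have hle : pvLowN k ≤ k := by
        have h1 : k &&& (k - 1) ≤ k - 1 := Nat.and_le_right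
        unfold pvLowN; omega
      rw [show 2 * k - 2 * pvLowN k = 2 * (k - pvLowN k) by omega, pvK_even]
      congr 1
      push_cast
      ring
    · -- odd
      have h2 : m % 2 = 1 := Nat.odd_iff.mp ho
      have hlow : pvLowN m = 1 := by
        unfold pvLowN; rw [pv_and_pred_odd m h2]; omega
      rw [pvK, if_neg (by omega), if_pos h2, hlow,
        show m - 1 = 2 * (m / 2) by omega, pvK_even]
      simp

theorem pvBand_low (m : Nat) (h : 0 < m) :
    PySem.Int.band (m : Int) (-(m : Int)) = (pvLowN m : Int) := by
  have h1 : ¬ (0 ≤ -(m : Int)) := by omega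
  rw [PySem.Int.band, if_pos (by omega), if_neg h1]
  unfold pvLowN
  have : (-(-(m : Int)) - 1).toNat = m - 1 := by omega
  rw [this, Int.toNat_natCast]

theorem pvAltLoop_eq_K : ∀ (fuel m : Nat), m < fuel → ∀ acc,
    pvAltLoop fuel (m : Int) acc = acc ++ pvK m 0 := by
  intro fuel
  induction fuel with
  | zero => omega
  | succ f IH =>
    intro m hm acc
    by_cases h0 : m = 0
    · subst h0
      rw [pvAltLoop, if_pos (by simp), pvK]
      simp
    · have hpos : 0 < m := by omega
      have hle : pvLowN m ≤ m := by
        have h1 : m &&& (m - 1) ≤ m - 1 := Nat.and_le_right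
        unfold pvLowN; omega
      rw [pvAltLoop, if_neg (by exact_mod_cast h0)]
      simp only [pvBand_low m hpos]
      rw [show (m : Int) - (pvLowN m : Int) = ((m - pvLowN m : Nat) : Int) by omega,
        IH (m - pvLowN m) (by have := pvLowN_pos m hpos; omega),
        pvK_cons m hpos 0]
      simp

theorem pvB_eq_K (m : Nat) : reduce_exponent_alt (m : Int) = pvK m 0 := by
  rw [reduce_exponent_alt, Int.toNat_natCast,
    pvAltLoop_eq_K (m + 1) m (by omega), List.nil_append]

-- ===== VERDICT (by name: the statement is the Claim_ definition above) =====
theorem reduce_exponent_spec : Claim_equal_reduce_exponent := by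
  intro e _ hpre
  unfold Spec_reduce_exponent
  obtain ⟨m, rfl⟩ := Int.eq_ofNat_of_zero_le hpre
  rw [pvA_eq_K, pvB_eq_K]
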